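-- pv_equiv track=rewrite | github.com/Nerogen/Intro_to_neural_networks | utils/util.py | get_vector_from_cubes
-- ===== SOURCE A (Python) =====
-- def get_vector_from_cubes(matrix, r: int):
--     """Make vector from cubes
--     :return vectors from matrix (r, g, b)"""
--     result = []
--     count = 0
--     vector = []
--     for i in range(len(matrix)):
--         count += 1
--         for j in range(len(matrix[i])):
--             vector.extend(matrix[i][j])
--         if count == r:
--             count = 0
--             result.append(vector[:])
--             vector = []
--
--     return result
-- ===== SOURCE B (Python) =====
-- def get_vector_from_cubes(matrix, r: int):
--     """Make vector from cubes
--     :return vectors from matrix (r, g, b)"""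
--     result = []
--     n = len(matrix)
--     i = 0
--     while r > 0 and i + r <= n:
--         result.append([v for row in matrix[i:i + r] for cell in row for v in cell])
--         i += r
--     return result
-- ===== Notes on version B (the rewrite author's own statement) =====
-- stated objective: simpler
-- what changed: Replaced A's per-row counter-and-reset accumulation across a growing shared vector with an index-striding loop that slices each complete block of r rows and flattens it in one comprehension.
import Mathlib
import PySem

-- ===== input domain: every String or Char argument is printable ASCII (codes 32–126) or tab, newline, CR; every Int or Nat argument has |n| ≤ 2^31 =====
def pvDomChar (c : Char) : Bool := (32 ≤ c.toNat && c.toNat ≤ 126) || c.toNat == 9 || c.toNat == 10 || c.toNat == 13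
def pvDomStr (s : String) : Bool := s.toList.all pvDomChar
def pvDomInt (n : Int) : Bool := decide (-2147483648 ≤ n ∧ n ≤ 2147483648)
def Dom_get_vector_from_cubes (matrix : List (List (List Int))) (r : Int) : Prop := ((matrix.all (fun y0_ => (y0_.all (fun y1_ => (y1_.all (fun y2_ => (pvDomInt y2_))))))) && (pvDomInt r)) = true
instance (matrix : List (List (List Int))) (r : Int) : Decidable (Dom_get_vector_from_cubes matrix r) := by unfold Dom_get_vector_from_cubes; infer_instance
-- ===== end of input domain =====

-- B replaces A's per-row counter-and-reset accumulation with an index-striding loop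
-- over complete blocks of r rows, flattening each slice at once (simpler decomposition).


-- ===== PORT A =====
-- one fold step of A's outer loop: bump count, extend vector by the row's cells,
-- and on count = r flush the vector into result
def pvStepA (r : Int) (st : List (List Int) × Int × List Int) (row : List (List Int)) :
    List (List Int) × Int × List Int :=
  let count := st.2.1 + 1
  let vector := row.foldl (fun v cell => v ++ cell) st.2.2
  if count = r then (st.1 ++ [vector], 0, ([] : List Int)) else (st.1, count, vector)

def get_vector_from_cubes (matrix : List (List (List Int))) (r : Int) : List (List Int) :=
  (matrix.foldl (pvStepA r) ([], 0, [])).1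

-- ===== PORT B =====
-- the while loop: while r > 0 and i + r <= n: append flattened matrix[i:i+r]; i += r
def pvAltLoop (matrix : List (List (List Int))) (r n i : Int) : List (List Int) :=
  if _h : 0 < r ∧ i + r ≤ n then
    ((PySem.List.slice matrix (some i) (some (i + r))).flatMap (fun row => row.flatMap (fun cell => cell)))
      :: pvAltLoop matrix r n (i + r)
  else []
termination_by (n - i).toNat
decreasing_by omega

def get_vector_from_cubes_alt (matrix : List (List (List Int))) (r : Int) : List (List Int) :=
  pvAltLoop matrix r (matrix.length : Int) 0

-- ===== PRECONDITION & SPEC =====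
def Spec_get_vector_from_cubes (matrix : List (List (List Int))) (r : Int) (out : List (List Int)) : Prop := out = get_vector_from_cubes_alt matrix r
instance (matrix : List (List (List Int))) (r : Int) (out : List (List Int)) : Decidable (Spec_get_vector_from_cubes matrix r out) := by unfold Spec_get_vector_from_cubes; infer_instance

-- ===== CLAIM (what is proved, stated in full; the proofs are below) =====
def Claim_equal_get_vector_from_cubes : Prop := ∀ (matrix : List (List (List Int))) (r : Int), Dom_get_vector_from_cubes matrix r → Spec_get_vector_from_cubes matrix r (get_vector_from_cubes matrix r)

-- ===== LEMMAS AND PROOFS =====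

-- middle form: recursive chunking over the list structure
def pvChunk (r : Int) (m : List (List (List Int))) : List (List Int) :=
  if _h : 0 < r ∧ r ≤ (m.length : Int) then
    (m.take r.toNat).flatMap (fun row => row.flatMap (fun cell => cell)) :: pvChunk r (m.drop r.toNat)
  else []
termination_by m.length
decreasing_by simp; omega

lemma pvFoldl_extend (row : List (List Int)) (v : List Int) :
    row.foldl (fun a b => a ++ b) v = v ++ row.flatMap (fun cell => cell) := by
  induction row generalizing v with
  | nil => simp
  | cons c t ih => simp [List.foldl, ih, List.append_assoc]

-- A's loop with r ≤ 0 never flushes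
lemma pvA_nonpos (r : Int) (hr : r ≤ 0) :
    ∀ (m : List (List (List Int))) (res : List (List Int)) (c : Int) (vec : List Int),
    0 ≤ c → (m.foldl (pvStepA r) (res, c, vec)).1 = res := by
  intro m
  induction m with
  | nil => intro res c vec _; simp
  | cons row t ih =>
    intro res c vec hc
    simp only [List.foldl, pvStepA]
    rw [if_neg (by omega)]
    exact ih res (c + 1) _ (by omega)

-- A's loop invariant against the recursive chunker
lemma pvA_inv (r : Int) (hr : 0 < r) :
    ∀ (m : List (List (List Int))) (res : List (List Int)) (c : Int) (vec : List Int),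
    0 ≤ c → c < r →
    (m.foldl (pvStepA r) (res, c, vec)).1 =
      res ++ (if (m.length : Int) < r - c then []
              else (vec ++ (m.take (r - c).toNat).flatMap (fun row => row.flatMap (fun cell => cell)))
                   :: pvChunk r (m.drop (r - c).toNat)) := by
  intro m
  induction m with
  | nil =>
    intro res c vec hc hcr
    rw [if_pos (by simp; omega)]
    simp
  | cons row t ih =>
    intro res c vec hc hcr
    simp only [List.foldl, pvStepA, pvFoldl_extend]
    by_cases hflush : c + 1 = r
    · rw [if_pos hflush, ih _ 0 _ (by omega) (by omega)]
      have h1 : r - c = 1 := by omega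
      have : pvChunk r t = (if (t.length : Int) < r - 0 then []
          else (([] : List Int) ++ (t.take (r - 0).toNat).flatMap (fun row => row.flatMap (fun cell => cell)))
               :: pvChunk r (t.drop (r - 0).toNat)) := by
        rw [pvChunk]
        by_cases hbig : r ≤ (t.length : Int)
        · rw [dif_pos ⟨hr, hbig⟩, if_neg (by omega)]
          simp
        · rw [dif_neg (by omega), if_pos (by omega)]
      rw [← this, h1]
      have hlen : ¬ ((row :: t).length : Int) < 1 := by simp
      rw [if_neg hlen]
      simp
    · rw [if_neg hflush, ih _ (c + 1) _ (by omega) (by omega)]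
      have htn : (r - c).toNat = (r - (c + 1)).toNat + 1 := by omega
      have hlen : ((row :: t).length : Int) < r - c ↔ (t.length : Int) < r - (c + 1) := by
        simp; omega
      by_cases hsmall : (t.length : Int) < r - (c + 1)
      · rw [if_pos hsmall, if_pos (hlen.mpr hsmall)]
      · rw [if_neg hsmall, if_neg (fun h => hsmall (hlen.mp h))]
        rw [htn]
        simp [List.append_assoc]

-- B's loop against the recursive chunker: pvAltLoop on index i is pvChunk of the suffix
lemma pvB_inv (matrix : List (List (List Int))) (r : Int) :
    ∀ (i : Int), 0 ≤ i →
    pvAltLoop matrix r (matrix.length : Int) i = pvChunk r (matrix.drop i.toNat) := by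
  intro i
  induction i using pvAltLoop.induct (r := r) (n := (matrix.length : Int)) with
  | case1 i h ih =>
    intro hi
    rw [pvAltLoop, dif_pos h, pvChunk, dif_pos (by simp; omega)]
    have hslice : PySem.List.slice matrix (some i) (some (i + r)) =
        (matrix.drop i.toNat).take ((i + r).toNat - i.toNat) := by
      exact PySem.List.slice_toNat matrix hi (by omega)
    have htn : (i + r).toNat - i.toNat = r.toNat := by omega
    rw [hslice, htn, ih (by omega)]
    have hdd : matrix.drop (i + r).toNat = (matrix.drop i.toNat).drop r.toNat := by
      rw [List.drop_drop]
      congr 1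
      omega
    rw [hdd]
  | case2 i h =>
    intro hi
    rw [pvAltLoop, dif_neg h, pvChunk, dif_neg (by simp; omega)]

-- ===== VERDICT (by name: the statement is the Claim_ definition above) =====
theorem get_vector_from_cubes_spec : Claim_equal_get_vector_from_cubes := by
  intro matrix r _
  show get_vector_from_cubes matrix r = get_vector_from_cubes_alt matrix r
  unfold get_vector_from_cubes get_vector_from_cubes_alt
  rw [pvB_inv matrix r 0 le_rfl]
  simp only [Int.toNat_zero, List.drop_zero]
  by_cases hr : 0 < r
  · rw [pvA_inv r hr matrix [] 0 [] le_rfl hr]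
    simp only [List.nil_append, Int.sub_zero]
    conv_rhs => rw [pvChunk]
    by_cases hbig : r ≤ (matrix.length : Int)
    · rw [dif_pos ⟨hr, hbig⟩, if_neg (by omega)]
    · rw [dif_neg (by omega), if_pos (by omega)]
  · rw [pvA_nonpos r (by omega) matrix [] 0 [] le_rfl, pvChunk, dif_neg (by omega)]
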